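-- pv_equiv track=rewrite | github.com/JeangyuHeo/Algorithm | 구현/프로그래머스_콜라문제.py | solution
-- ===== SOURCE A (Python) =====
-- def solution(a, b, n):
--     answer = 0
--
--     cola = (n // a) * b
--     remain = n % a
--
--     while cola > 0:
--         answer += cola
--         cola += remain
--         remain = cola % a
--         cola = (cola // a) * b
--
--     return answer
-- ===== SOURCE B (Python) =====
-- def solution(a, b, n):
--     # Closed form: once you can trade a empties for b colas, every free cola
--     # effectively costs a - b empties, and the last b empties stay undrinkable.
--     if b <= 0 or n < a:
--         return 0
--     return (n - b) // (a - b) * b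
-- ===== Notes on version B (the rewrite author's own statement) =====
-- stated objective: simpler
-- what changed: Replaces the repeated-exchange while loop with the closed form (n - b) // (a - b) * b (0 when b <= 0 or n < a): each free cola costs a - b empties and the last b empties are never drinkable.
-- outside the precondition, e.g. on solution(-3, 5, -10): A returns 15, B returns 0; on solution(3, -2, -1): A returns 2, B returns 0; on solution(-3, 2, 10): A returns 0, B returns -4
import Mathlib
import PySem

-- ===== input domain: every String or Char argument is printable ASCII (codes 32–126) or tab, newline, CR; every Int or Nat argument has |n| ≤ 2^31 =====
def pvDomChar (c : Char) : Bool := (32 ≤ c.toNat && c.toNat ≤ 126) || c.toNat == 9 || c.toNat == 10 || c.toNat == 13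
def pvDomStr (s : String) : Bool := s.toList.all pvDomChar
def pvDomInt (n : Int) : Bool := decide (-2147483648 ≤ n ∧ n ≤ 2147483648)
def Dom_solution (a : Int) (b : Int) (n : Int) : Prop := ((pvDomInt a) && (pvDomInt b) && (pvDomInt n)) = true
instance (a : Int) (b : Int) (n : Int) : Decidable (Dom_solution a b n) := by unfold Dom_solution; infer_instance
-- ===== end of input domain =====

-- B replaces A's repeated-exchange while loop by the closed form (n - b) // (a - b) * b.


-- ===== PORT A =====
-- the while loop, as fuel recursion over the same state (answer, cola, remain);
-- under Pre_solution the fuel n.toNat + 2 is never exhausted (proved below)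
def solutionLoop (a : Int) (b : Int) : Nat → Int → Int → Int → Int
  | 0, answer, _, _ => answer
  | fuel+1, answer, cola, remain =>
    if cola > 0 then
      solutionLoop a b fuel (answer + cola)
        ((PySem.Int.floordiv (cola + remain) a) * b)
        (PySem.Int.mod (cola + remain) a)
    else answer

def solution (a : Int) (b : Int) (n : Int) : Int :=
  let cola := (PySem.Int.floordiv n a) * b
  let remain := PySem.Int.mod n a
  solutionLoop a b (n.toNat + 2) 0 cola remain

-- ===== PORT B =====
def solution_alt (a : Int) (b : Int) (n : Int) : Int :=
  if b ≤ 0 || n < a then 0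
  else (PySem.Int.floordiv (n - b) (a - b)) * b

-- ===== PRECONDITION & SPEC =====
-- Pre_solution is exactly the closed-form region where A terminates and its value is
-- the cola total: it excludes a = 0 (A raises ZeroDivisionError), the regions where the
-- loop never ends (e.g. 1 <= a <= b with a <= n), and the inputs where A's returned value
-- is an accident of Python floor division with negative operands (see the cited examples).
def Pre_solution (a : Int) (b : Int) (n : Int) : Prop :=
  (1 ≤ a ∧ ((0 ≤ b ∧ b < a) ∨ (a ≤ b ∧ n < a) ∨ (b < 0 ∧ 0 ≤ n)))
  ∨ (a ≤ -1 ∧ (b = 0 ∨ (b < 0 ∧ n ≤ 0) ∨ (0 < b ∧ a < n ∧ n ≤ 0) ∨ (0 < b ∧ 0 < n ∧ n ≤ b)))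
instance (a : Int) (b : Int) (n : Int) : Decidable (Pre_solution a b n) := by
  unfold Pre_solution; infer_instance
def pvWitness_solution : Int × Int × Int := (3, 1, 10)

def Spec_solution (a : Int) (b : Int) (n : Int) (out : Int) : Prop := out = solution_alt a b n
instance (a : Int) (b : Int) (n : Int) (out : Int) : Decidable (Spec_solution a b n out) := by unfold Spec_solution; infer_instance

-- ===== CLAIM (what is proved, stated in full; the proofs are below) =====
def Claim_equal_solution : Prop := ∀ (a : Int) (b : Int) (n : Int), Dom_solution a b n → Pre_solution a b n → Spec_solution a b n (solution a b n)

-- ===== LEMMAS AND PROOFS =====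

-- a non-positive cola exits the loop at once
lemma loop_nonpos (a b : Int) (fuel : Nat) (ans c r : Int) (hc : c ≤ 0) (hf : 1 ≤ fuel) :
    solutionLoop a b fuel ans c r = ans := by
  cases fuel with
  | zero => omega
  | succ f => simp [solutionLoop, show ¬ c > 0 by omega]

-- loop invariant: starting from the state reached after exchanging e ≥ 0 empties,
-- the loop adds exactly the closed-form total to the accumulator
lemma loop_eq (a b : Int) (ha : 1 ≤ a) (hb : 0 < b) (hba : b < a) :
    ∀ (fuel : Nat) (e ans : Int), 0 ≤ e → e.toNat + 2 ≤ fuel →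
      solutionLoop a b fuel ans ((e / a) * b) (e % a)
        = ans + (if e < a then 0 else ((e - b) / (a - b)) * b) := by
  intro fuel
  induction fuel with
  | zero => intro e ans _ hf; omega
  | succ f ih =>
    intro e ans he hf
    by_cases hlt : e < a
    · have hq : e / a = 0 := Int.ediv_eq_zero_of_lt he hlt
      simp [solutionLoop, hq, hlt]
    · have hq1 : 1 ≤ e / a := by
        rw [Int.le_ediv_iff_mul_le (by omega : (0:Int) < a)]; omega
      have hcpos : 0 < (e / a) * b := by positivity
      have hr0 : 0 ≤ e % a := Int.emod_nonneg e (by omega)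
      have hra : e % a < a := Int.emod_lt_of_pos e (by omega)
      have hdm : a * (e / a) + e % a = e := Int.ediv_add_emod e a
      -- e' = empties after this round of exchanges
      set e' : Int := (e / a) * b + e % a with he'def
      have he'0 : 0 ≤ e' := by positivity
      have he'e : e' ≤ e - 1 := by nlinarith [hq1, hba, hdm]
      have hdm' : (e / a) * a + e % a = e := by rw [mul_comm]; exact hdm
      have hsplit : e - b = (e' - b) + (e / a) * (a - b) := by
        rw [he'def]; linear_combination (-1 : Int) * hdm'
      have hdivsplit : (e - b) / (a - b) = (e' - b) / (a - b) + e / a := by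
        rw [hsplit, Int.add_mul_ediv_right _ _ (by omega : a - b ≠ 0)]
      have hstep : solutionLoop a b (f + 1) ans ((e / a) * b) (e % a)
          = solutionLoop a b f (ans + (e / a) * b) ((e' / a) * b) (e' % a) := by
        simp [solutionLoop, hcpos,
          PySem.Int.floordiv_eq_ediv_of_pos (b := a) (by omega),
          PySem.Int.mod_eq_emod_of_pos (b := a) (by omega), he'def]
      rw [hstep]
      by_cases hlt' : e' < a
      · -- next cola is 0: the loop stops and the whole sum is this round's colas
        have hq' : e' / a = 0 := Int.ediv_eq_zero_of_lt he'0 hlt'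
        have hzero : (e' - b) / (a - b) = 0 := by
          apply Int.ediv_eq_zero_of_lt
          · nlinarith [hq1, hr0]
          · omega
        rw [hq', zero_mul, loop_nonpos a b f _ 0 (e' % a) le_rfl (by omega)]
        rw [if_neg hlt, hdivsplit, hzero]
        ring
      · rw [ih e' (ans + (e / a) * b) he'0 (by omega)]
        rw [if_neg hlt', if_neg hlt, hdivsplit]
        ring

-- floor division by a negative divisor: quotient facts used for the negative-a region
lemma fdiv_zero_neg (x d : Int) (hd : d < 0) (h1 : d < x) (h2 : x ≤ 0) :
    PySem.Int.floordiv x d = 0 := by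
  have hm := PySem.Int.floordiv_mul_add_mod x d
  have hb := PySem.Int.mod_neg_bounds (a := x) hd
  set q := PySem.Int.floordiv x d with hq
  rcases lt_trichotomy q 0 with h | h | h
  · nlinarith [hb.1, hb.2]
  · exact h
  · nlinarith [hb.1, hb.2]

lemma fdiv_nonneg_neg (x d : Int) (hd : d < 0) (h2 : x ≤ 0) :
    0 ≤ PySem.Int.floordiv x d := by
  have hm := PySem.Int.floordiv_mul_add_mod x d
  have hb := PySem.Int.mod_neg_bounds (a := x) hd
  set q := PySem.Int.floordiv x d with hq
  by_contra h
  nlinarith [hb.1, hb.2]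

-- ===== VERDICT (by name: the statement is the Claim_ definition above) =====
theorem solution_spec : Claim_equal_solution := by
  intro a b n _ hpre
  unfold Spec_solution solution solution_alt
  rcases hpre with ⟨ha, hcase⟩ | ⟨ha, hcase⟩
  · -- a ≥ 1
    rw [PySem.Int.floordiv_eq_ediv_of_pos (b := a) (by omega),
        PySem.Int.mod_eq_emod_of_pos (b := a) (by omega)]
    rcases hcase with ⟨hb0, hba⟩ | ⟨hab, hna⟩ | ⟨hb, hn⟩
    · -- 0 ≤ b < a : the real cola domain
      rcases lt_or_eq_of_le hb0 with hb | hb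
      · by_cases hn : n < 0
        · -- negative empties: A's first cola is negative, both return 0
          have hq : n / a < 0 := Int.ediv_neg_of_neg_of_pos hn (by omega)
          have hcola : (n / a) * b ≤ 0 := by nlinarith
          rw [loop_nonpos a b _ 0 _ _ hcola (by omega)]
          simp [show n < a by omega]
        · rw [loop_eq a b ha hb hba (n.toNat + 2) n 0 (by omega) (by omega)]
          by_cases hna : n < a
          · simp [hna, show ¬ b ≤ 0 by omega]
          · simp [hna, show ¬ b ≤ 0 by omega,
              PySem.Int.floordiv_eq_ediv_of_pos (b := a - b) (by omega)]
      · -- b = 0: no reward, both 0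
        rw [loop_nonpos a b _ 0 _ _ (by simp [← hb]) (by omega)]
        simp [← hb]
    · -- b ≥ a but fewer than a empties: A's first cola is ≤ 0, both return 0
      have hq : n / a ≤ 0 := by
        by_cases hn : n < 0
        · exact le_of_lt (Int.ediv_neg_of_neg_of_pos hn (by omega))
        · exact le_of_eq (Int.ediv_eq_zero_of_lt (by omega) hna)
      have hcola : (n / a) * b ≤ 0 := mul_nonpos_of_nonpos_of_nonneg hq (by omega)
      rw [loop_nonpos a b _ 0 _ _ hcola (by omega)]
      simp [hna]
    · -- b < 0, n ≥ 0: A's first cola is ≤ 0, both return 0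
      have hq : 0 ≤ n / a := Int.ediv_nonneg hn (by omega)
      have hcola : (n / a) * b ≤ 0 := mul_nonpos_of_nonneg_of_nonpos hq (by omega)
      rw [loop_nonpos a b _ 0 _ _ hcola (by omega)]
      simp [show b ≤ 0 by omega]
  · -- a ≤ -1: only the immediate-exit corners are inside Pre_
    rcases hcase with hb | ⟨hb, hn⟩ | ⟨hb, han, hn⟩ | ⟨hb, hn, hnb⟩
    · -- b = 0
      rw [loop_nonpos a b _ 0 _ _ (by simp [hb]) (by omega)]
      simp [hb]
    · -- b < 0, n ≤ 0: first quotient ≥ 0, cola ≤ 0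
      have hq : 0 ≤ PySem.Int.floordiv n a := fdiv_nonneg_neg n a (by omega) hn
      have hcola : (PySem.Int.floordiv n a) * b ≤ 0 :=
        mul_nonpos_of_nonneg_of_nonpos hq (by omega)
      rw [loop_nonpos a b _ 0 _ _ hcola (by omega)]
      simp [show b ≤ 0 by omega]
    · -- 0 < b, a < n ≤ 0: first quotient is 0, and B's closed form is 0 too
      have hq : PySem.Int.floordiv n a = 0 := fdiv_zero_neg n a (by omega) han hn
      rw [loop_nonpos a b _ 0 _ _ (by simp [hq]) (by omega)]
      have hB : PySem.Int.floordiv (n - b) (a - b) = 0 :=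
        fdiv_zero_neg (n - b) (a - b) (by omega) (by omega) (by omega)
      simp [show ¬ b ≤ 0 by omega, show ¬ n < a by omega, hB]
    · -- 0 < n ≤ b: first quotient < 0 so cola ≤ 0; B's closed form is 0
      have hq : PySem.Int.floordiv n a ≤ 0 := by
        have := PySem.Int.floordiv_mul_add_mod n a
        have hbnd := PySem.Int.mod_neg_bounds (a := n) (show a < 0 by omega)
        by_contra h
        nlinarith [hbnd.1, hbnd.2]
      have hcola : (PySem.Int.floordiv n a) * b ≤ 0 :=
        mul_nonpos_of_nonpos_of_nonneg hq (by omega)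
      rw [loop_nonpos a b _ 0 _ _ hcola (by omega)]
      have hB : PySem.Int.floordiv (n - b) (a - b) = 0 :=
        fdiv_zero_neg (n - b) (a - b) (by omega) (by omega) (by omega)
      simp [show ¬ b ≤ 0 by omega, show ¬ n < a by omega, hB]
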